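-- pv_equiv track=rewrite | github.com/p5ithurism/napari-piscis | src/napari_piscis/_widget.py | infer_img_axes
-- ===== SOURCE A (Python) =====
-- def infer_img_axes(shape: tuple) -> str:
--     """
--     Recursively infers the axes of an image based on its shape.
--     Returns strings like 'yx', 'zyx', or 'yxc'.
--     """
--     if len(shape) == 2:
--         return 'yx'
--     elif len(shape) == 3:
--         # If last dim is 3 or 4, assume RGB/RGBA (Channels)
--         if shape[-1] in (3, 4):
--             return 'yxc'
--
--         # Otherwise, assume the smallest dimension is Z or Time,
--         # but standard biological images are usually ZYX if not RGB.
--         min_dim_idx = shape.index(min(shape))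
--         low_dim_shape = list(shape)
--         low_dim_shape.pop(min_dim_idx)
--         low_dim_axes = infer_img_axes(tuple(low_dim_shape))
--         return low_dim_axes[:min_dim_idx] + 'z' + low_dim_axes[min_dim_idx:]
--     else:
--         raise ValueError(f"Image shape {shape} is not supported by the notebook logic.")
-- ===== SOURCE B (Python) =====
-- def infer_img_axes(shape: tuple) -> str:
--     """
--     Infers image axes from shape with direct branches (no recursion).
--     """
--     if len(shape) == 2:
--         return 'yx'
--     if len(shape) == 3:
--         a, b, c = shape
--         if c in (3, 4):
--             return 'yxc'
--         if a <= b and a <= c: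
--             return 'zyx'
--         if b <= c:
--             return 'yzx'
--         return 'yxz'
--     raise ValueError(f"Image shape {shape} is not supported by the notebook logic.")
-- ===== Notes on version B (the rewrite author's own statement) =====
-- stated objective: simpler
-- what changed: Replaced the recursive min-index/pop/splice construction with a direct closed-form branch table (len 2 -> 'yx'; len 3 -> 'yxc' for RGB last dim, else 'zyx'/'yzx'/'yxz' chosen by comparisons that reproduce first-occurrence-of-min semantics).
import Mathlib
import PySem

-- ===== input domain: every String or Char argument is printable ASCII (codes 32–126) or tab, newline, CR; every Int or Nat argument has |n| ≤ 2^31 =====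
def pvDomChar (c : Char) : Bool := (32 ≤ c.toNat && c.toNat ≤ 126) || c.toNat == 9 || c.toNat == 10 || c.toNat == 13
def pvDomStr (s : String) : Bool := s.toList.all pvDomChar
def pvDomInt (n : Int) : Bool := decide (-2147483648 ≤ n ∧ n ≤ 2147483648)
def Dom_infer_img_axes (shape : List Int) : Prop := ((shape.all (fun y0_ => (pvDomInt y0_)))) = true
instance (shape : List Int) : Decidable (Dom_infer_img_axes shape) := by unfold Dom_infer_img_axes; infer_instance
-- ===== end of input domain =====

-- B replaces A's recursive min-index/pop/splice construction by a direct branch table over the three-element case; objective: simpler.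


-- helper cited by the port's decreasing_by: popping from a nonempty list shortens it
theorem pv_pop_len_lt (xs : List Int) (i : Int) (h : xs ≠ []) :
    ((((PySem.List.pop? xs i).map Prod.snd).getD []).length) < xs.length := by
  cases hp : PySem.List.pop? xs i with
  | none => simp; exact List.length_pos_iff.mpr h
  | some r =>
    have h2 := PySem.List.length_of_pop?_eq_some xs hp
    simp; omega

-- ===== PORT A =====
def infer_img_axes (shape : List Int) : String :=
  if shape.length = 2 then "yx"
  else if h3 : shape.length = 3 then
    -- shape[-1] in (3, 4)
    let last := (PySem.List.pyGet? shape (-1)).getD 0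
    if last = 3 ∨ last = 4 then "yxc"
    else
      let m := (PySem.List.min? shape id).getD 0
      let min_dim_idx := (PySem.List.index? shape m).getD 0
      let low_dim_shape := ((PySem.List.pop? shape (min_dim_idx : Int)).map Prod.snd).getD []
      let low_dim_axes := infer_img_axes low_dim_shape
      -- low_dim_axes[:idx] + 'z' + low_dim_axes[idx:]
      String.ofList (PySem.List.slice low_dim_axes.toList none (some (min_dim_idx : Int)) ++
        ['z'] ++ PySem.List.slice low_dim_axes.toList (some (min_dim_idx : Int)) none)
  else "ValueError"  -- Python raises ValueError here; excluded by Pre_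
termination_by shape.length
decreasing_by
  exact pv_pop_len_lt shape _ (by intro hnil; rw [hnil] at h3; simp at h3)

-- ===== PORT B =====
def infer_img_axes_alt (shape : List Int) : String :=
  match shape with
  | [_, _] => "yx"
  | [a, b, c] =>
    if c = 3 ∨ c = 4 then "yxc"
    else if a ≤ b ∧ a ≤ c then "zyx"
    else if b ≤ c then "yzx"
    else "yxz"
  | _ => "ValueError"  -- Python raises ValueError here; excluded by Pre_

-- ===== PRECONDITION & SPEC =====
-- Pre_: exactly the shapes A accepts; on any other length A (and B) raises ValueError.
def Pre_infer_img_axes (shape : List Int) : Prop := shape.length = 2 ∨ shape.length = 3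
instance (shape : List Int) : Decidable (Pre_infer_img_axes shape) := by unfold Pre_infer_img_axes; infer_instance
def pvWitness_infer_img_axes : List Int := [5, 100, 100]

def Spec_infer_img_axes (shape : List Int) (out : String) : Prop := out = infer_img_axes_alt shape
instance (shape : List Int) (out : String) : Decidable (Spec_infer_img_axes shape out) := by unfold Spec_infer_img_axes; infer_instance

-- ===== CLAIM (what is proved, stated in full; the proofs are below) =====
def Claim_equal_infer_img_axes : Prop := ∀ (shape : List Int), Dom_infer_img_axes shape → Pre_infer_img_axes shape → Spec_infer_img_axes shape (infer_img_axes shape)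

-- ===== LEMMAS AND PROOFS =====
theorem infer_img_axes_two (a b : Int) : infer_img_axes [a, b] = "yx" := by
  rw [infer_img_axes]; simp

theorem infer_img_axes_rgb (a b c : Int) (hc : c = 3 ∨ c = 4) :
    infer_img_axes [a, b, c] = "yxc" := by
  rw [infer_img_axes]
  norm_num [PySem.List.pyGet?, PySem.List.pyIdx?, hc]

theorem infer_img_axes_three0 (a b c : Int) (hc : ¬ (c = 3 ∨ c = 4)) (hab : a ≤ b) (hac : a ≤ c) :
    infer_img_axes [a, b, c] = "zyx" := by
  have hmin : PySem.List.min? [a, b, c] id = some a := by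
    simp [PySem.List.min?, show ¬ b < a by omega, show ¬ c < a by omega]
  rw [infer_img_axes]
  simp only [List.length_cons, List.length_nil, hmin]
  norm_num [hc, List.idxOf?, List.findIdx?, List.findIdx?.go, PySem.List.pop?,
    PySem.List.pyGet?, PySem.List.pyIdx?, infer_img_axes_two, PySem.List.slice]
  decide

theorem infer_img_axes_three1 (a b c : Int) (hc : ¬ (c = 3 ∨ c = 4)) (hab : b < a) (hbc : b ≤ c) :
    infer_img_axes [a, b, c] = "yzx" := by
  have hmin : PySem.List.min? [a, b, c] id = some b := by
    simp [PySem.List.min?, show b < a from hab, show ¬ c < b by omega]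
  rw [infer_img_axes]
  simp only [List.length_cons, List.length_nil, hmin]
  norm_num [hc, List.idxOf?, List.findIdx?, List.findIdx?.go, show ¬ a = b by omega,
    PySem.List.pop?, PySem.List.pyGet?, PySem.List.pyIdx?, infer_img_axes_two,
    PySem.List.slice, PySem.List.clampIdx]
  decide

theorem infer_img_axes_three2 (a b c : Int) (hc : ¬ (c = 3 ∨ c = 4)) (hac : c < a) (hbc : c < b) :
    infer_img_axes [a, b, c] = "yxz" := by
  have hmin : PySem.List.min? [a, b, c] id = some c := by
    by_cases hab : b < a
    · simp [PySem.List.min?, hab, show c < b from hbc]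
    · simp [PySem.List.min?, hab, show c < a from hac]
  rw [infer_img_axes]
  simp only [List.length_cons, List.length_nil, hmin]
  norm_num [hc, List.idxOf?, List.findIdx?, List.findIdx?.go, show ¬ a = c by omega,
    show ¬ b = c by omega, PySem.List.pop?, PySem.List.pyGet?, PySem.List.pyIdx?,
    List.eraseIdx, show ((2:Int)).toNat = 2 from rfl, infer_img_axes_two,
    PySem.List.slice, PySem.List.clampIdx]
  decide

-- ===== VERDICT (by name: the statement is the Claim_ definition above) =====
theorem infer_img_axes_spec : Claim_equal_infer_img_axes := by
  intro shape _ hpre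
  unfold Spec_infer_img_axes
  rcases hpre with h2 | h3
  · match shape, h2 with
    | [a, b], _ => rw [infer_img_axes_two]; rfl
  · match shape, h3 with
    | [a, b, c], _ =>
      by_cases hc : c = 3 ∨ c = 4
      · rw [infer_img_axes_rgb a b c hc]; simp [infer_img_axes_alt, hc]
      · by_cases h1 : a ≤ b ∧ a ≤ c
        · rw [infer_img_axes_three0 a b c hc h1.1 h1.2]
          simp [infer_img_axes_alt, hc, h1]
        · by_cases hbc : b ≤ c
          · rw [infer_img_axes_three1 a b c hc (by omega) hbc]
            simp [infer_img_axes_alt, hc, h1, hbc]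
          · rw [infer_img_axes_three2 a b c hc (by omega) (by omega)]
            simp [infer_img_axes_alt, hc, h1, hbc]
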